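-- pv_equiv track=rewrite | github.com/jcolinpatrick/kryptos | scripts/e_bespoke_10_rotation_grid.py | write_by_columns
-- ===== SOURCE A (Python) =====
-- def write_by_columns(text: str, cols: int, rows: int) -> list[list[str]]:
--     """Write text into grid column-by-column (top to bottom, left to right)."""
--     padded = text.ljust(cols * rows, 'X')
--     grid = [[''] * cols for _ in range(rows)]
--     idx = 0
--     for c in range(cols):
--         for r in range(rows):
--             grid[r][c] = padded[idx]
--             idx += 1
--     return grid
-- ===== SOURCE B (Python) =====
-- def write_by_columns(text: str, cols: int, rows: int) -> list[list[str]]: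
--     """Write text into grid column-by-column (top to bottom, left to right)."""
--     padded = text.ljust(cols * rows, 'X')
--     columns = [padded[c * rows:(c + 1) * rows] for c in range(cols)]
--     return [[col[r] for col in columns] for r in range(rows)]
-- ===== Notes on version B (the rewrite author's own statement) =====
-- stated objective: alternative
-- what changed: B works in two staged passes over a different intermediate structure: it first materialises each column as a string slice padded[c*rows:(c+1)*rows] and then transposes that list of column strings by per-row indexing, instead of A's single column-major sweep mutating a pre-allocated grid through a running counter.
import Mathlib
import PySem

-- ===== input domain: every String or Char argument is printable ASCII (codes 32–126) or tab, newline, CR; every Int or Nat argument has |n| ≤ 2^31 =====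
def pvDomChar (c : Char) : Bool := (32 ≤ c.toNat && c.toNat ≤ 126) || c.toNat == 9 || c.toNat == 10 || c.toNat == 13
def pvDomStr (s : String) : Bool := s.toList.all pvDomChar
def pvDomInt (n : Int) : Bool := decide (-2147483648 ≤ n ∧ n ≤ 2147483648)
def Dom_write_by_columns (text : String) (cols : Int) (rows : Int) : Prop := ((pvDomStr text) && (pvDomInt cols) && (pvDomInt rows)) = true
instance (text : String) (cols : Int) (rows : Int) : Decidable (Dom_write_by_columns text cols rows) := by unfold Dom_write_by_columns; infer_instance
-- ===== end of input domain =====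

-- B stages the work differently: it first materialises each column as the string slice
-- padded[c*rows:(c+1)*rows] and then transposes that list of columns by per-row indexing,
-- instead of A's column-major sweep mutating a pre-allocated grid through a running counter
-- (objective: alternative).

-- shared helper: text.ljust(cols*rows, 'X') on List Char (exact: pads on the right, never truncates)
def pvLjust (cs : List Char) (w : Int) : List Char :=
  cs ++ List.replicate (w - (cs.length : Int)).toNat 'X'

-- ===== PORT A =====
-- padded[idx] is ported with pyGetD; the executed iterations always have idx in range,
-- so the default is never consulted (A never raises).
def write_by_columns (text : String) (cols : Int) (rows : Int) : List (List String) :=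
  let padded := pvLjust text.toList (cols * rows)
  let grid := (PySem.List.pyRange 0 rows 1).map (fun _ => List.replicate cols.toNat "")
  let st := (PySem.List.pyRange 0 cols 1).foldl (fun st c =>
      (PySem.List.pyRange 0 rows 1).foldl (fun (st : List (List String) × Int) r =>
        (PySem.List.pySetD st.1 r
          (PySem.List.pySetD (PySem.List.pyGetD st.1 r []) c
            (String.ofList [PySem.List.pyGetD padded st.2 'X'])), st.2 + 1)) st)
    (grid, (0 : Int))
  st.1

-- ===== PORT B =====
-- col[r] is ported with pyGetD; every executed access has 0 ≤ r < col.length = rows,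
-- so the default is never consulted (B never raises).
def write_by_columns_alt (text : String) (cols : Int) (rows : Int) : List (List String) :=
  let padded := pvLjust text.toList (cols * rows)
  let columns := (PySem.List.pyRange 0 cols 1).map (fun c =>
    PySem.List.slice padded (some (c * rows)) (some ((c + 1) * rows)))
  (PySem.List.pyRange 0 rows 1).map (fun r =>
    columns.map (fun col => String.ofList [PySem.List.pyGetD col r 'X']))

-- ===== PRECONDITION & SPEC =====
def Spec_write_by_columns (text : String) (cols : Int) (rows : Int) (out : List (List String)) : Prop := out = write_by_columns_alt text cols rows
instance (text : String) (cols : Int) (rows : Int) (out : List (List String)) : Decidable (Spec_write_by_columns text cols rows out) := by unfold Spec_write_by_columns; infer_instance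

-- ===== CLAIM (what is proved, stated in full; the proofs are below) =====
def Claim_equal_write_by_columns : Prop := ∀ (text : String) (cols : Int) (rows : Int), Dom_write_by_columns text cols rows → Spec_write_by_columns text cols rows (write_by_columns text cols rows)

-- ===== LEMMAS AND PROOFS =====

-- A's inner-loop body (one row step of column c), abstracted over the cell producer f
def pvStep (f : Int → Char) (c : Int) (st : List (List String) × Int) (r : Int) :
    List (List String) × Int :=
  (PySem.List.pySetD st.1 r
    (PySem.List.pySetD (PySem.List.pyGetD st.1 r []) c (String.ofList [f st.2])), st.2 + 1)

-- grid after the first m rows of column c have been written (idx was the counter on entry)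
def pvUpd (f : Int → Char) (c : Int) (m : Nat) (idx : Int) (grid : List (List String)) :
    List (List String) :=
  grid.zipIdx.map (fun p =>
    if p.2 < m then PySem.List.pySetD p.1 c (String.ofList [f (idx + p.2)]) else p.1)

theorem pvUpd_length (f : Int → Char) (c : Int) (m : Nat) (idx : Int)
    (grid : List (List String)) : (pvUpd f c m idx grid).length = grid.length := by
  simp [pvUpd]

theorem pvUpd_getElem? (f : Int → Char) (c : Int) (m : Nat) (idx : Int)
    (grid : List (List String)) (r : Nat) (h : r < grid.length) :
    (pvUpd f c m idx grid)[r]? =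
      some (if r < m then PySem.List.pySetD (grid[r]'h) c (String.ofList [f (idx + (r : Int))])
        else grid[r]'h) := by
  simp [pvUpd, h]

theorem pvUpd_zero (f : Int → Char) (c : Int) (idx : Int) (grid : List (List String)) :
    pvUpd f c 0 idx grid = grid := by
  apply List.ext_getElem?
  intro r
  by_cases h : r < grid.length
  · rw [pvUpd_getElem? f c 0 idx grid r h]
    simp [h]
  · have h1 : (pvUpd f c 0 idx grid)[r]? = none :=
      List.getElem?_eq_none (by rw [pvUpd_length]; omega)
    have h2 : grid[r]? = none := List.getElem?_eq_none (by omega)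
    rw [h1, h2]

theorem pvUpd_succ (f : Int → Char) (c : Int) (m : Nat) (idx : Int)
    (grid : List (List String)) :
    pvUpd f c (m + 1) idx grid =
      (pvStep f c (pvUpd f c m idx grid, idx + m) (m : Int)).1 := by
  have hm : (pvUpd f c m idx grid).length = grid.length := pvUpd_length f c m idx grid
  apply List.ext_getElem?
  intro r
  by_cases h : r < grid.length
  · rw [pvUpd_getElem? f c (m + 1) idx grid r h]
    simp only [pvStep, PySem.List.pySetD_natCast, PySem.List.pyGetD_natCast]
    by_cases hrm : r = m
    · subst hrm
      have hlt : r < (pvUpd f c r idx grid).length := by rw [hm]; exact h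
      rw [List.getElem?_set_self']
      have hgd : (pvUpd f c r idx grid).getD r [] = grid[r]'h := by
        rw [List.getD_eq_getElem?_getD, pvUpd_getElem? f c r idx grid r h]
        simp
      rw [hgd, List.getElem?_eq_getElem hlt]
      simp [Function.const]
    · rw [List.getElem?_set_ne (by omega)]
      rw [pvUpd_getElem? f c m idx grid r h]
      have hiff : (r < m + 1) ↔ (r < m) := by omega
      simp only [hiff]
  · have h1 : (pvUpd f c (m + 1) idx grid)[r]? = none :=
      List.getElem?_eq_none (by rw [pvUpd_length]; omega)
    have h2 : ((pvStep f c (pvUpd f c m idx grid, idx + m) (m : Int)).1)[r]? = none := by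
      apply List.getElem?_eq_none
      simp only [pvStep, PySem.List.pySetD_natCast]
      rw [List.length_set, hm]
      omega
    rw [h1, h2]

theorem pv_inner (f : Int → Char) (c : Int) (m : Nat) (grid : List (List String)) (idx : Int) :
    (List.range m).foldl (fun st (r : Nat) => pvStep f c st (r : Int)) (grid, idx) =
      (pvUpd f c m idx grid, idx + m) := by
  induction m with
  | zero => simp [pvUpd_zero]
  | succ n ih =>
      rw [List.range_succ, List.foldl_append, ih, List.foldl_cons, List.foldl_nil]
      rw [pvUpd_succ]
      have h2 : (pvStep f c (pvUpd f c n idx grid, idx + n) (n : Int)).2 = idx + (n + 1 : Nat) := by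
        simp [pvStep]
        ring
      exact Prod.ext rfl h2

-- grid after the first n whole columns
def pvOuter (f : Int → Char) (R C : Nat) : Nat → List (List String)
  | 0 => List.replicate R (List.replicate C "")
  | n + 1 => pvUpd f (n : Int) R ((n : Int) * (R : Int)) (pvOuter f R C n)

theorem pv_outer (f : Int → Char) (R C : Nat) (n : Nat) :
    (List.range n).foldl
      (fun st (cN : Nat) =>
        (List.range R).foldl (fun st (r : Nat) => pvStep f (cN : Int) st (r : Int)) st)
      (List.replicate R (List.replicate C ""), (0 : Int)) =
      (pvOuter f R C n, (n : Int) * (R : Int)) := by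
  induction n with
  | zero => simp [pvOuter]
  | succ k ih =>
      rw [List.range_succ, List.foldl_append, ih, List.foldl_cons, List.foldl_nil]
      rw [pv_inner]
      refine Prod.ext rfl ?_
      push_cast
      ring

theorem pvOuter_length (f : Int → Char) (R C n : Nat) : (pvOuter f R C n).length = R := by
  induction n with
  | zero => simp [pvOuter]
  | succ k ih => simp [pvOuter, pvUpd_length, ih]

-- a single row after the first n columns
def pvRow (f : Int → Char) (R C : Nat) (r : Nat) (n : Nat) : List String :=
  (List.range n).foldl
    (fun row (cN : Nat) =>
      PySem.List.pySetD row (cN : Int)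
        (String.ofList [f ((cN : Int) * (R : Int) + (r : Int))]))
    (List.replicate C "")

theorem pvOuter_getElem? (f : Int → Char) (R C n : Nat) (r : Nat) (h : r < R) :
    (pvOuter f R C n)[r]? = some (pvRow f R C r n) := by
  induction n with
  | zero => simp [pvOuter, pvRow, h]
  | succ k ih =>
      have hl : r < (pvOuter f R C k).length := by rw [pvOuter_length]; exact h
      rw [List.getElem?_eq_getElem hl] at ih
      have ihv : (pvOuter f R C k)[r]'hl = pvRow f R C r k := by
        injection ih
      show (pvUpd f (k : Int) R ((k : Int) * (R : Int)) (pvOuter f R C k))[r]? = _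
      rw [pvUpd_getElem? f (k : Int) R ((k : Int) * (R : Int)) (pvOuter f R C k) r hl]
      rw [if_pos h, ihv]
      simp only [pvRow]
      rw [List.range_succ, List.foldl_append, List.foldl_cons, List.foldl_nil]

theorem pvRow_closed (f : Int → Char) (R C : Nat) (r : Nat) (n : Nat) (hn : n ≤ C) :
    pvRow f R C r n =
      (List.range n).map
          (fun (cN : Nat) => String.ofList [f ((cN : Int) * (R : Int) + (r : Int))]) ++
        List.replicate (C - n) "" := by
  induction n with
  | zero => simp [pvRow]
  | succ k ih =>
      simp only [pvRow]
      rw [List.range_succ, List.foldl_append, List.foldl_cons, List.foldl_nil]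
      rw [show (List.range k).foldl
          (fun row (cN : Nat) =>
            PySem.List.pySetD row (cN : Int)
              (String.ofList [f ((cN : Int) * (R : Int) + (r : Int))]))
          (List.replicate C "") = pvRow f R C r k from rfl]
      rw [ih (by omega)]
      rw [PySem.List.pySetD_natCast]
      have hCk : C - k = (C - (k + 1)) + 1 := by omega
      rw [hCk, List.replicate_succ]
      rw [List.set_append_right _ _ (by simp)]
      simp

-- B's cell: indexing the c-th column slice at row r is indexing padded at c*rows+r
theorem pv_slice_cell (padded : List Char) (rows : Int) (cN rN : Nat)
    (hrows : (rows.toNat : Int) = rows) (hr : rN < rows.toNat) :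
    PySem.List.pyGetD
        (PySem.List.slice padded (some ((cN : Int) * rows)) (some (((cN : Int) + 1) * rows)))
        (rN : Int) 'X' =
      PySem.List.pyGetD padded ((cN : Int) * rows + (rN : Int)) 'X' := by
  have h1 : (cN : Int) * rows = ((cN * rows.toNat : Nat) : Int) := by
    push_cast [hrows]; ring
  have h2 : ((cN : Int) + 1) * rows = ((cN * rows.toNat + rows.toNat : Nat) : Int) := by
    push_cast [hrows]; ring
  rw [h1, h2, PySem.List.slice_natCast]
  have h4 : cN * rows.toNat + rows.toNat - cN * rows.toNat = rows.toNat := by omega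
  have h5 : ((cN * rows.toNat : Nat) : Int) + (rN : Int) = ((cN * rows.toNat + rN : Nat) : Int) := by
    push_cast; ring
  rw [h4, h5, PySem.List.pyGetD_natCast, PySem.List.pyGetD_natCast]
  rw [List.getD_eq_getElem?_getD, List.getD_eq_getElem?_getD]
  rw [List.getElem?_take, if_pos hr, List.getElem?_drop]

-- B in closed form: cell (r,c) is padded[c*rows+r]
theorem pv_alt_closed (text : String) (cols rows : Int) :
    write_by_columns_alt text cols rows =
      (List.range rows.toNat).map (fun (rN : Nat) =>
        (List.range cols.toNat).map (fun (cN : Nat) =>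
          String.ofList [PySem.List.pyGetD (pvLjust text.toList (cols * rows))
            ((cN : Int) * rows + (rN : Int)) 'X'])) := by
  simp only [write_by_columns_alt]
  rw [PySem.List.pyRange_one, PySem.List.pyRange_one]
  simp only [sub_zero, zero_add, List.map_map, Function.comp_def]
  apply List.map_congr_left
  intro rN hrN
  rw [List.mem_range] at hrN
  have hrows : (rows.toNat : Int) = rows := by omega
  apply List.map_congr_left
  intro cN _
  rw [pv_slice_cell (pvLjust text.toList (cols * rows)) rows cN rN hrows hrN]

-- ===== VERDICT (by name: the statement is the Claim_ definition above) =====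
theorem write_by_columns_spec : Claim_equal_write_by_columns := by
  intro text cols rows _
  simp only [Spec_write_by_columns, write_by_columns]
  rw [pv_alt_closed]
  have hR : PySem.List.pyRange 0 rows 1 = List.map (fun k : Nat => (k : Int)) (List.range rows.toNat) := by
    rw [PySem.List.pyRange_one]
    simp only [sub_zero, zero_add]
  have hC : PySem.List.pyRange 0 cols 1 = List.map (fun k : Nat => (k : Int)) (List.range cols.toNat) := by
    rw [PySem.List.pyRange_one]
    simp only [sub_zero, zero_add]
  simp only [hR, hC, List.foldl_map, List.map_map, Function.comp_def, List.map_const',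
    List.length_range]
  have key := pv_outer (fun i => PySem.List.pyGetD (pvLjust text.toList (cols * rows)) i 'X')
    rows.toNat cols.toNat cols.toNat
  simp only [pvStep] at key
  rw [key]
  show pvOuter (fun i => PySem.List.pyGetD (pvLjust text.toList (cols * rows)) i 'X')
    rows.toNat cols.toNat cols.toNat = _
  apply List.ext_getElem?
  intro r
  by_cases h : r < rows.toNat
  · have hrows : (rows.toNat : Int) = rows := by omega
    rw [pvOuter_getElem? _ rows.toNat cols.toNat cols.toNat r h]
    rw [pvRow_closed _ rows.toNat cols.toNat r cols.toNat (le_refl _)]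
    rw [List.getElem?_map, List.getElem?_range h]
    simp only [Nat.sub_self, List.replicate_zero, List.append_nil, Option.map_some]
    simp only [hrows]
  · have hle : rows.toNat ≤ r := by omega
    have h1 : (pvOuter (fun i => PySem.List.pyGetD (pvLjust text.toList (cols * rows)) i 'X')
        rows.toNat cols.toNat cols.toNat)[r]? = none :=
      List.getElem?_eq_none (by rw [pvOuter_length]; exact hle)
    rw [h1]
    symm
    apply List.getElem?_eq_none
    rw [List.length_map, List.length_range]
    exact hle
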